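-- pv_equiv track=rewrite | github.com/OnemusCT/temporal-redux | sourcefiles/pcbackend.py | _ct_ascii_to_pc_str
-- ===== SOURCE A (Python) =====
-- _CT_KEYWORD_TO_PC: dict[str, str] = {
--     '{crono}':      '<NAME_CRO>',
--     '{marle}':      '<NAME_MAR>',
--     '{lucca}':      '<NAME_LUC>',
--     '{robo}':       '<NAME_ROB>',
--     '{frog}':       '<NAME_FRO>',
--     '{ayla}':       '<NAME_AYL>',
--     '{magus}':      '<NAME_MAG>',
--     '{crononick}':  '<NICK_CRO>',
--     '{page break}': '<PAGE>',
--     '{line break}': '\\',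
-- }
--
-- def _ct_ascii_to_pc_str(s: str) -> str:
--     """Translate CTString ASCII ({keyword} format) back to PC <Tag> format."""
--     result: list[str] = []
--     pos = 0
--     while pos < len(s):
--         if s[pos] == '{':
--             end = s.find('}', pos)
--             if end == -1:
--                 pos += 1
--                 continue
--             keyword = s[pos:end + 1]
--             if keyword.startswith('{delay '):
--                 hex_val = keyword[7:-1]
--                 result.append(f'<WAIT>{hex_val}</WAIT>')
--             elif keyword in _CT_KEYWORD_TO_PC:
--                 result.append(_CT_KEYWORD_TO_PC[keyword])
--             # Unknown keywords are silently dropped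
--             pos = end + 1
--         else:
--             result.append(s[pos])
--             pos += 1
--     return ''.join(result)
-- ===== SOURCE B (Python) =====
-- _CT_KEYWORD_TO_PC: dict[str, str] = {
--     '{crono}':      '<NAME_CRO>',
--     '{marle}':      '<NAME_MAR>',
--     '{lucca}':      '<NAME_LUC>',
--     '{robo}':       '<NAME_ROB>',
--     '{frog}':       '<NAME_FRO>',
--     '{ayla}':       '<NAME_AYL>',
--     '{magus}':      '<NAME_MAG>',
--     '{crononick}':  '<NICK_CRO>',
--     '{page break}': '<PAGE>',
--     '{line break}': '\\',
-- }
--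
-- def _ct_ascii_to_pc_str(s: str) -> str:
--     """Translate CTString ASCII ({keyword} format) back to PC <Tag> format."""
--     out: list[str] = []
--     while True:
--         head, brace, s = s.partition('{')
--         out.append(head)
--         if not brace:
--             return ''.join(out)
--         body, close, rest = s.partition('}')
--         if close:
--             keyword = '{' + body + '}'
--             if keyword.startswith('{delay '):
--                 out.append(f'<WAIT>{keyword[7:-1]}</WAIT>')
--             else:
--                 out.append(_CT_KEYWORD_TO_PC.get(keyword, ''))
--             s = rest
--         # no '}' anywhere after: the unmatched '{' is dropped, keep scanning
-- ===== Notes on version B (the rewrite author's own statement) =====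
-- stated objective: idiomatic
-- what changed: Replaces A's manual integer-cursor loop (per-character append plus an explicit find for each closing brace) by a str.partition-driven loop that splits off whole literal spans up to the next opening brace and then up to its matching closing brace, translating each braced keyword as it goes.
import Mathlib
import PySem

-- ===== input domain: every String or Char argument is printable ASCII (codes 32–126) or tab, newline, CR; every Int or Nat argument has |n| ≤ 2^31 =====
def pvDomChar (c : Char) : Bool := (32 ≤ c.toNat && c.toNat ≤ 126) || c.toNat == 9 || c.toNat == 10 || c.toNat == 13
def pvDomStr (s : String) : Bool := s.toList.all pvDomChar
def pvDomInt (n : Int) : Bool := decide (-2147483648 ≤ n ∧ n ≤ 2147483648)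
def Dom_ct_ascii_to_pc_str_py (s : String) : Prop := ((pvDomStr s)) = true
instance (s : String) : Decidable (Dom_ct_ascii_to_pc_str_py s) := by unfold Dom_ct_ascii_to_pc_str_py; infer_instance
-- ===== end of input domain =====

-- B replaces A's manual index/`find` cursor loop with a `str.partition`-driven loop
-- (split off literal text up to the next '{', then up to its closing '}') — same
-- return value, more idiomatic; no side effects in either version.

-- ===== PORT A =====

-- the module-level keyword table
def ctKeywordToPC : PySem.Dict String String := PySem.Dict.ofList
  [("{crono}", "<NAME_CRO>"), ("{marle}", "<NAME_MAR>"), ("{lucca}", "<NAME_LUC>"),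
   ("{robo}", "<NAME_ROB>"), ("{frog}", "<NAME_FRO>"), ("{ayla}", "<NAME_AYL>"),
   ("{magus}", "<NAME_MAG>"), ("{crononick}", "<NICK_CRO>"), ("{page break}", "<PAGE>"),
   ("{line break}", "\\")]

-- A's keyword-translation branch: '{delay …}' → <WAIT>, table hit → tag, else dropped
def ctTransA (kw : List Char) : List Char :=
  if PySem.Chars.startswith kw "{delay ".toList then
    "<WAIT>".toList ++ PySem.List.slice kw (some 7) (some (-1)) ++ "</WAIT>".toList
  else
    match ctKeywordToPC.get? (String.mk kw) with
    | some v => v.toList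
    | none => []

-- termination facts for the cursor loop (cited in decreasing_by)
theorem ctFindFrom_bounds (cs : List Char) (pos : Nat) (hp : pos ≤ cs.length)
    (hne : PySem.Chars.findFrom cs ['}'] (pos : Int) none ≠ -1) :
    (pos : Int) ≤ PySem.Chars.findFrom cs ['}'] (pos : Int) none ∧
      (PySem.Chars.findFrom cs ['}'] (pos : Int) none).toNat < cs.length := by
  obtain ⟨h1, h2, -⟩ := PySem.Chars.findFrom_natCast_spec cs ['}'] pos hp hne
  refine ⟨h1, ?_⟩
  rcases h2 with ⟨t, ht⟩
  have h3 : (cs.drop (PySem.Chars.findFrom cs ['}'] (pos : Int) none).toNat).length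
      = t.length + 1 := by
    rw [← ht]; simp
  have h4 := List.length_drop (l := cs)
    (i := (PySem.Chars.findFrom cs ['}'] (pos : Int) none).toNat)
  omega

-- the while-loop: state is the cursor `pos`; emitted pieces are concatenated
def ctLoopA (cs : List Char) (pos : Nat) : List Char :=
  if h : pos < cs.length then
    if cs[pos] = '{' then
      let e := PySem.Chars.findFrom cs ['}'] (pos : Int) none   -- s.find('}', pos)
      if he : e = -1 then
        ctLoopA cs (pos + 1)
      else
        ctTransA (PySem.List.slice cs (some (pos : Int)) (some (e + 1))) ++
          ctLoopA cs (e + 1).toNat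
    else
      cs[pos] :: ctLoopA cs (pos + 1)
  else []
termination_by cs.length - pos
decreasing_by
  · omega
  · have := ctFindFrom_bounds cs pos (by omega) he
    omega
  · omega

def ct_ascii_to_pc_str_py (s : String) : String := String.mk (ctLoopA s.toList 0)

-- ===== PORT B =====

-- str.partition(sep) for a one-character separator (exact: splits at the first
-- occurrence; the Bool is whether the separator was found)
def ctPart (ch : Char) : List Char → List Char × Bool × List Char
  | [] => ([], false, [])
  | c :: cs =>
      if c = ch then ([], true, cs)
      else
        let r := ctPart ch cs
        (c :: r.1, r.2.1, r.2.2)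

-- B's keyword-translation branch (dict .get with default '')
def ctTransB (kw : List Char) : List Char :=
  if PySem.Chars.startswith kw "{delay ".toList then
    "<WAIT>".toList ++ PySem.List.slice kw (some 7) (some (-1)) ++ "</WAIT>".toList
  else
    (ctKeywordToPC.getD (String.mk kw) "").toList

theorem ctPart_tail_len (ch : Char) (cs : List Char) (hf : (ctPart ch cs).2.1 = true) :
    (ctPart ch cs).2.2.length < cs.length := by
  induction cs with
  | nil => simp [ctPart] at hf
  | cons c cs ih =>
      by_cases hc : c = ch
      · simp [ctPart, hc]
      · simp [ctPart, hc] at hf ⊢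
        exact Nat.le_of_lt (ih hf)

-- the while-True loop of B, as recursion on the remaining string
def ctLoopB (cs : List Char) : List Char :=
  let p := ctPart '{' cs
  if hb : p.2.1 = true then
    let q := ctPart '}' p.2.2
    if hc : q.2.1 = true then
      p.1 ++ ctTransB ('{' :: q.1 ++ ['}']) ++ ctLoopB q.2.2
    else
      p.1 ++ ctLoopB p.2.2
  else cs
termination_by cs.length
decreasing_by
  · exact Nat.lt_of_lt_of_le (ctPart_tail_len '}' _ hc)
      (Nat.le_of_lt (ctPart_tail_len '{' cs hb))
  · exact ctPart_tail_len '{' cs hb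

def ct_ascii_to_pc_str_py_alt (s : String) : String := String.mk (ctLoopB s.toList)

-- ===== PRECONDITION & SPEC =====
def Spec_ct_ascii_to_pc_str_py (s : String) (out : String) : Prop := out = ct_ascii_to_pc_str_py_alt s
instance (s : String) (out : String) : Decidable (Spec_ct_ascii_to_pc_str_py s out) := by unfold Spec_ct_ascii_to_pc_str_py; infer_instance

-- ===== CLAIM (what is proved, stated in full; the proofs are below) =====
def Claim_equal_ct_ascii_to_pc_str_py : Prop := ∀ (s : String), Dom_ct_ascii_to_pc_str_py s → Spec_ct_ascii_to_pc_str_py s (ct_ascii_to_pc_str_py s)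

-- ===== LEMMAS AND PROOFS =====

theorem ctTrans_eq (kw : List Char) : ctTransA kw = ctTransB kw := by
  unfold ctTransA ctTransB
  split
  · rfl
  · simp only [PySem.Dict.getD]
    cases ctKeywordToPC.get? (String.mk kw) <;> rfl

theorem ctPart_eq (ch : Char) (l : List Char) :
    ctPart ch l = (l.takeWhile (fun x => !decide (x = ch)), decide (ch ∈ l),
      (l.dropWhile (fun x => !decide (x = ch))).tail) := by
  induction l with
  | nil => simp [ctPart]
  | cons c cs ih =>
      by_cases hc : c = ch
      · subst hc; simp [ctPart, List.takeWhile_cons, List.dropWhile_cons]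
      · simp [ctPart, ih, List.takeWhile_cons, List.dropWhile_cons, hc, Ne.symm hc]

-- l = (text before the first ch) ++ ch :: (text after it), when ch occurs
theorem ctSplit_at_mem (ch : Char) (l : List Char) (h : ch ∈ l) :
    l = l.takeWhile (fun x => !decide (x = ch)) ++
      ch :: (l.dropWhile (fun x => !decide (x = ch))).tail := by
  induction l with
  | nil => cases h
  | cons c cs ih =>
      by_cases hc : c = ch
      · subst hc; simp [List.takeWhile_cons, List.dropWhile_cons]
      · have hm : ch ∈ cs := by
          rcases List.mem_cons.mp h with h' | h'
          · exact absurd h'.symm hc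
          · exact h'
        simp only [List.takeWhile_cons, List.dropWhile_cons, hc, decide_false,
          Bool.not_false, if_true, List.cons_append]
        exact congrArg (c :: ·) (ih hm)

theorem ctLoopB_nil : ctLoopB [] = [] := by
  unfold ctLoopB; simp [ctPart]

theorem ctLoopB_no_brace (l : List Char) (h : '{' ∉ l) : ctLoopB l = l := by
  unfold ctLoopB
  simp [ctPart_eq, h]

theorem ctLoopB_cons_ne (c : Char) (l : List Char) (hc : c ≠ '{') :
    ctLoopB (c :: l) = c :: ctLoopB l := by
  by_cases hm : '{' ∈ l
  · conv_lhs => unfold ctLoopB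
    conv_rhs => unfold ctLoopB
    simp [ctPart_eq, hm, List.takeWhile_cons, List.dropWhile_cons, hc]
    split <;> simp
  · have hmc : '{' ∉ c :: l := by
      intro hcon
      rcases List.mem_cons.mp hcon with h' | h'
      · exact hc h'.symm
      · exact hm h'
    rw [ctLoopB_no_brace _ hm, ctLoopB_no_brace _ hmc]

theorem ctLoopB_brace_no_close (l : List Char) (h : '}' ∉ l) :
    ctLoopB ('{' :: l) = ctLoopB l := by
  conv_lhs => unfold ctLoopB
  simp [ctPart_eq, h]

theorem ctLoopB_brace_close (body rest : List Char) (h : '}' ∉ body) :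
    ctLoopB ('{' :: (body ++ '}' :: rest)) =
      ctTransB ('{' :: body ++ ['}']) ++ ctLoopB rest := by
  conv_lhs => unfold ctLoopB
  have hpos : ∀ a ∈ body, (!decide (a = '}')) = true := by
    intro a ha
    simp only [Bool.not_eq_eq_eq_not, Bool.not_true, decide_eq_false_iff_not]
    rintro rfl; exact h ha
  have htw : (body ++ '}' :: rest).takeWhile (fun x => !decide (x = '}')) = body := by
    rw [List.takeWhile_append_of_pos hpos]
    simp [List.takeWhile_cons]
  have hdw : (body ++ '}' :: rest).dropWhile (fun x => !decide (x = '}')) = '}' :: rest := by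
    rw [List.dropWhile_append_of_pos hpos]
    simp [List.dropWhile_cons]
  have hcl : '}' ∈ body ++ '}' :: rest := by simp
  simp [ctPart_eq, List.takeWhile_cons, List.dropWhile_cons, htw, hdw, hcl]

theorem ctInfix_singleton (a : Char) (l : List Char) : [a] <:+: l ↔ a ∈ l := by
  constructor
  · rintro ⟨s, t, rfl⟩; simp
  · intro h
    rcases List.mem_iff_append.mp h with ⟨s, t, rfl⟩
    exact ⟨s, t, by simp⟩

theorem ctTakeWhile_len_of_first (ch : Char) :
    ∀ (l : List Char) (t : Nat), (ht : t < l.length) → l[t] = ch →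
      (∀ i (hi : i < t), l[i]'(by omega) ≠ ch) →
      (l.takeWhile (fun x => !decide (x = ch))).length = t := by
  intro l
  induction l with
  | nil => intro t ht; simp at ht
  | cons c cs ih =>
      intro t ht hget hmin
      cases t with
      | zero =>
          simp at hget
          simp [List.takeWhile_cons, hget]
      | succ t =>
          have hc : c ≠ ch := by
            have := hmin 0 (Nat.succ_pos t); simpa using this
          rw [List.takeWhile_cons, if_pos (by simpa using hc)]
          simp only [List.length_cons]
          have := ih t (by simpa using Nat.lt_of_succ_lt_succ ht) (by simpa using hget)
            (fun i hi => by
              have := hmin (i + 1) (Nat.succ_lt_succ hi)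
              simpa using this)
          omega

theorem ctFind_singleton (l : List Char) (ch : Char) :
    PySem.Chars.find l [ch] =
      if ch ∈ l then ((l.takeWhile (fun x => !decide (x = ch))).length : Int) else -1 := by
  by_cases hm : ch ∈ l
  · rw [if_pos hm]
    have hne : PySem.Chars.find l [ch] ≠ -1 :=
      (PySem.Chars.find_ne_neg_one_iff l [ch]).mpr ((ctInfix_singleton ch l).mpr hm)
    have hnn : 0 ≤ PySem.Chars.find l [ch] := by
      have := PySem.Chars.neg_one_le_find l [ch]; omega
    obtain ⟨hpre, hmin⟩ := PySem.Chars.find_spec (s := l) (sub := [ch]) hnn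
    set t := (PySem.Chars.find l [ch]).toNat with htdef
    have hlt : t < l.length := by
      rcases hpre with ⟨u, hu⟩
      have h1 : (l.drop t).length = u.length + 1 := by rw [← hu]; simp
      have h2 := List.length_drop (l := l) (i := t)
      omega
    have hget : l[t] = ch := by
      have hd := List.drop_eq_getElem_cons hlt
      rcases hpre with ⟨u, hu⟩
      rw [hd] at hu
      exact (List.cons_eq_cons.mp hu).1.symm
    have hfirst : ∀ i (hi : i < t), l[i]'(by omega) ≠ ch := by
      intro i hi hcon
      apply hmin i hi
      rw [List.drop_eq_getElem_cons (by omega : i < l.length), hcon]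
      exact ⟨l.drop (i + 1), rfl⟩
    have := ctTakeWhile_len_of_first ch l t hlt hget hfirst
    omega
  · rw [if_neg hm]
    exact (PySem.Chars.find_eq_neg_one_iff l [ch]).mpr
      (fun hc => hm ((ctInfix_singleton ch l).mp hc))

theorem ctLoop_eq (n : Nat) : ∀ (cs : List Char) (pos : Nat), cs.length - pos ≤ n →
    ctLoopA cs pos = ctLoopB (cs.drop pos) := by
  induction n with
  | zero =>
      intro cs pos h
      rw [List.drop_of_length_le (by omega), ctLoopB_nil]
      unfold ctLoopA
      rw [dif_neg (by omega)]
  | succ n ih =>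
      intro cs pos h
      by_cases hp : pos < cs.length
      · have hdrop : cs.drop pos = cs[pos] :: cs.drop (pos + 1) :=
          List.drop_eq_getElem_cons hp
        by_cases hbrace : cs[pos] = '{'
        · have hk : pos ≤ cs.length := by omega
          have hff := PySem.Chars.findFrom_natCast cs ['}'] pos hk
          rw [ctFind_singleton] at hff
          by_cases hm : '}' ∈ cs.drop pos
          · -- a closing brace exists after pos
            have hffv : PySem.Chars.findFrom cs ['}'] (pos : Int) =
                (pos : Int) + ((cs.drop pos).takeWhile (fun x => !decide (x = '}'))).length := by
              rw [hff, if_pos hm, if_neg (by omega)]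
            have hdw : (cs.drop pos).takeWhile (fun x => !decide (x = '}'))
                = '{' :: (cs.drop (pos+1)).takeWhile (fun x => !decide (x = '}')) := by
              rw [hdrop, List.takeWhile_cons, hbrace]
              simp
            have hm' : '}' ∈ cs.drop (pos + 1) := by
              rw [hdrop] at hm
              rcases List.mem_cons.mp hm with h' | h'
              · rw [hbrace] at h'; cases h'
              · exact h'
            have hsplit := ctSplit_at_mem '}' (cs.drop (pos+1)) hm'
            set body := (cs.drop (pos+1)).takeWhile (fun x => !decide (x = '}')) with hbody
            set rest := ((cs.drop (pos+1)).dropWhile (fun x => !decide (x = '}'))).tail with hrest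
            have hbodyno : '}' ∉ body := by
              intro hcon
              have := List.mem_takeWhile_imp hcon
              simp at this
            have hflen : ((cs.drop pos).takeWhile (fun x => !decide (x = '}'))).length
                = body.length + 1 := by rw [hdw]; simp
            have hkw : PySem.List.slice cs (some (pos : Int))
                (some (PySem.Chars.findFrom cs ['}'] (pos : Int) + 1))
                = '{' :: body ++ ['}'] := by
              rw [hffv, hflen]
              have hcast : (pos : Int) + ((body.length + 1 : Nat) : Int) + 1
                  = (pos : Int) + ((body.length + 2 : Nat) : Int) := by push_cast; ring
              rw [hcast, PySem.List.slice_natCast_add]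
              rw [hdrop, hbrace, hsplit]
              have : '{' :: (body ++ '}' :: rest) = ('{' :: body ++ ['}']) ++ rest := by simp
              rw [this, List.take_append_of_le_length (by simp)]
              rw [List.take_of_length_le (by simp)]
            conv_lhs => unfold ctLoopA
            rw [dif_pos hp, if_pos hbrace]
            simp only
            rw [dif_neg (by rw [hffv]; omega), hkw]
            have hnext : ((PySem.Chars.findFrom cs ['}'] (pos : Int) + 1)).toNat
                = pos + 1 + (body.length + 1) := by
              rw [hffv, hflen]; omega
            rw [hnext, ih cs (pos + 1 + (body.length + 1)) (by omega), ctTrans_eq]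
            rw [hdrop, hbrace, hsplit, ctLoopB_brace_close body rest hbodyno]
            congr 1
            rw [← List.drop_drop, hsplit]
            rw [show body ++ '}' :: rest = (body ++ ['}']) ++ rest by simp,
              List.drop_left' (by simp)]
          · -- no closing brace anywhere after pos: the '{' is dropped
            have hffv : PySem.Chars.findFrom cs ['}'] (pos : Int) = -1 := by
              rw [hff]; simp [hm]
            conv_lhs => unfold ctLoopA
            rw [dif_pos hp, if_pos hbrace]
            simp only
            rw [dif_pos hffv]
            have hm' : '}' ∉ cs.drop (pos + 1) := by
              intro hcon
              exact hm (hdrop ▸ List.mem_cons_of_mem _ hcon)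
            rw [ih cs (pos + 1) (by omega), hdrop, hbrace,
              ctLoopB_brace_no_close _ hm']
        · -- ordinary character: emitted verbatim
          conv_lhs => unfold ctLoopA
          rw [dif_pos hp, if_neg hbrace]
          rw [ih cs (pos + 1) (by omega), hdrop,
            ctLoopB_cons_ne _ _ hbrace]
      · rw [List.drop_of_length_le (by omega), ctLoopB_nil]
        unfold ctLoopA
        rw [dif_neg hp]

-- ===== VERDICT (by name: the statement is the Claim_ definition above) =====
theorem ct_ascii_to_pc_str_py_spec : Claim_equal_ct_ascii_to_pc_str_py := by
  intro s _
  unfold Spec_ct_ascii_to_pc_str_py ct_ascii_to_pc_str_py ct_ascii_to_pc_str_py_alt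
  rw [ctLoop_eq (s.toList.length) s.toList 0 (by omega), List.drop_zero]
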